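-- pv_equiv track=rewrite | github.com/DinoBronf/ALC | Guía1 ALC.py | suma_pos_o_neg
-- ===== SOURCE A (Python) =====
-- def suma_pos_o_neg(A)-> bool:
--     sumaP = 0
--     sumaN = 0
--     for elem in A:
--         for i in range(len(elem)):
--             if elem[i] > 0:
--                 sumaP += elem[i]
--             else:
--                 sumaN += (-1) * elem[i]
--     if sumaP > sumaN:
--         return True
--     else:
--         return False
-- ===== SOURCE B (Python) =====
-- def suma_pos_o_neg(A) -> bool:
--     # positive sum exceeds negative sum  iff  the total sum of all entries is > 0
--     return sum(sum(row) for row in A) > 0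
-- ===== Notes on version B (the rewrite author's own statement) =====
-- stated objective: simpler
-- what changed: Replaces the two sign-split accumulators and per-element branch by a single total sum of all entries compared against 0 (sumaP - sumaN equals the grand total since zeros cancel).
import Mathlib
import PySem

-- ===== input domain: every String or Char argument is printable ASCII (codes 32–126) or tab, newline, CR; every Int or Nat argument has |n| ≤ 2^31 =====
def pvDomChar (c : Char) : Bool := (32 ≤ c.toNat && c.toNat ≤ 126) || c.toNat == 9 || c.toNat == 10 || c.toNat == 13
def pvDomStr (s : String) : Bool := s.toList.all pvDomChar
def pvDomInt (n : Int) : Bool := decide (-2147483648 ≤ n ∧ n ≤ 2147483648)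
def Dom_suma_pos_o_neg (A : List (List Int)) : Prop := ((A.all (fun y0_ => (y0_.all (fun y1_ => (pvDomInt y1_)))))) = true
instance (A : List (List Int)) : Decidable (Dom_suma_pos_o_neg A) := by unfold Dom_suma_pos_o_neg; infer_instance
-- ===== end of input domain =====

-- B replaces A's two sign-split accumulators and per-element branch by one grand total compared against 0 (simpler decomposition).

-- ===== PORT A =====
def suma_pos_o_neg (A : List (List Int)) : Bool :=
  let s : Int × Int := A.foldl
    (fun (p : Int × Int) elem =>
      (PySem.List.pyRange 0 (elem.length : Int) 1).foldl
        (fun (q : Int × Int) i =>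
          if PySem.List.pyGetD elem i 0 > 0 then
            (q.1 + PySem.List.pyGetD elem i 0, q.2)
          else
            (q.1, q.2 + (-1) * PySem.List.pyGetD elem i 0)) p)
    (0, 0)
  if s.1 > s.2 then true else false

-- ===== PORT B =====
def suma_pos_o_neg_alt (A : List (List Int)) : Bool :=
  decide ((A.map (fun row => row.sum)).sum > 0)

-- ===== PRECONDITION & SPEC =====
def Spec_suma_pos_o_neg (A : List (List Int)) (out : Bool) : Prop := out = suma_pos_o_neg_alt A
instance (A : List (List Int)) (out : Bool) : Decidable (Spec_suma_pos_o_neg A out) := by unfold Spec_suma_pos_o_neg; infer_instance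

-- ===== CLAIM (what is proved, stated in full; the proofs are below) =====
def Claim_equal_suma_pos_o_neg : Prop := ∀ (A : List (List Int)), Dom_suma_pos_o_neg A → Spec_suma_pos_o_neg A (suma_pos_o_neg A)

-- ===== LEMMAS AND PROOFS =====

-- inner loop invariant: the fold over one row adds the row's sum to sumaP - sumaN
theorem pv_row_invariant (row : List Int) (q : Int × Int) :
    (row.foldl (fun (q : Int × Int) e =>
        if e > 0 then (q.1 + e, q.2) else (q.1, q.2 + (-1) * e)) q).1
    - (row.foldl (fun (q : Int × Int) e =>
        if e > 0 then (q.1 + e, q.2) else (q.1, q.2 + (-1) * e)) q).2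
    = q.1 - q.2 + row.sum := by
  induction row generalizing q with
  | nil => simp
  | cons x xs ih =>
    simp only [List.foldl_cons, List.sum_cons]
    rw [ih]
    split_ifs <;> simp <;> ring

-- outer loop invariant
theorem pv_outer_invariant (A : List (List Int)) (p : Int × Int) :
    (A.foldl (fun (p : Int × Int) elem =>
        elem.foldl (fun (q : Int × Int) e =>
          if e > 0 then (q.1 + e, q.2) else (q.1, q.2 + (-1) * e)) p) p).1
    - (A.foldl (fun (p : Int × Int) elem =>
        elem.foldl (fun (q : Int × Int) e =>
          if e > 0 then (q.1 + e, q.2) else (q.1, q.2 + (-1) * e)) p) p).2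
    = p.1 - p.2 + (A.map (fun row => row.sum)).sum := by
  induction A generalizing p with
  | nil => simp
  | cons r rs ih =>
    simp only [List.foldl_cons, List.map_cons, List.sum_cons]
    rw [ih, pv_row_invariant]
    ring

-- ===== VERDICT (by name: the statement is the Claim_ definition above) =====
theorem suma_pos_o_neg_spec : Claim_equal_suma_pos_o_neg := by
  intro A _
  unfold Spec_suma_pos_o_neg suma_pos_o_neg suma_pos_o_neg_alt
  have hrow : ∀ (elem : List Int) (p : Int × Int),
      (PySem.List.pyRange 0 (elem.length : Int) 1).foldl
        (fun (q : Int × Int) i =>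
          if PySem.List.pyGetD elem i 0 > 0 then
            (q.1 + PySem.List.pyGetD elem i 0, q.2)
          else
            (q.1, q.2 + (-1) * PySem.List.pyGetD elem i 0)) p
      = elem.foldl (fun (q : Int × Int) e =>
          if e > 0 then (q.1 + e, q.2) else (q.1, q.2 + (-1) * e)) p := by
    intro elem p
    exact PySem.List.foldl_pyRange_zero_pyGetD' elem 0
      (fun (q : Int × Int) e =>
        if e > 0 then (q.1 + e, q.2) else (q.1, q.2 + (-1) * e)) p
  simp only [hrow]
  have h := pv_outer_invariant A (0, 0)
  set s := A.foldl (fun (p : Int × Int) elem =>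
    elem.foldl (fun (q : Int × Int) e =>
      if e > 0 then (q.1 + e, q.2) else (q.1, q.2 + (-1) * e)) p) (0, 0) with hs
  by_cases hgt : s.1 > s.2 <;> simp_all <;> omega
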